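-- pv_equiv track=rewrite | github.com/Anilian/my_education | Python-Algorithm-Stepik/diff_number.py | algoritm
-- ===== SOURCE A (Python) =====
-- def algoritm(n):
--     count = n
--     list_numbers = []
--     if n == 1:
--         list_numbers.append(1)
--     else:
--         for i in range(1, n):
--             count = count - i
--             if count >= (i+1):
--                 list_numbers.append(i)
--             else:
--                 list_numbers.append(count+i)
--                 break
--     return list_numbers
-- ===== SOURCE B (Python) =====
-- def algoritm(n):
--     if n < 1:
--         return []
--     k = 1
--     while (k + 1) * (k + 2) <= 2 * n:
--         k += 1
--     return list(range(1, k)) + [n - k * (k - 1) // 2]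
-- ===== Notes on version B (the rewrite author's own statement) =====
-- stated objective: alternative
-- what changed: Instead of interleaving the subtraction, append and break inside one greedy loop, B first finds the break point k (the largest k whose triangular number is at most n) by a simple search and then builds the answer directly as the range of integers below k plus the absorbed remainder.
import Mathlib
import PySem

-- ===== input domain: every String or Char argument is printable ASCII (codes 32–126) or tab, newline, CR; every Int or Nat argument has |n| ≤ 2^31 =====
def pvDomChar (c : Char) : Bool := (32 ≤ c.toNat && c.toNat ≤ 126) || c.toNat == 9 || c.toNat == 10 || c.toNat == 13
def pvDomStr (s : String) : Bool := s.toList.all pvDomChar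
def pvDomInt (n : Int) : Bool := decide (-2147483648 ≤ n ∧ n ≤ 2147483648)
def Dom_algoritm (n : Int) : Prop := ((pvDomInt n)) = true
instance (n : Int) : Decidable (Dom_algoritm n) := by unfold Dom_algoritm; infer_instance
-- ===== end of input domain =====

-- B re-decomposes A's greedy subtract/append/break loop: it first finds the break point k
-- (largest k with k(k+1)/2 ≤ n) by a triangular-number search, then emits range(1,k) plus the
-- absorbed remainder; same cost, different structure ("alternative").

-- ===== PORT A =====
-- the 'for i in range(1, n)' loop of A, with 'break' modelled by returning early;
-- fuel = number of remaining loop indices, state (i, count, list_numbers)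
def algoritmLoop : Nat → Int → Int → List Int → List Int
  | 0, _, _, acc => acc
  | fuel+1, i, count, acc =>
    let count' := count - i
    if count' ≥ i + 1 then algoritmLoop fuel (i + 1) count' (acc ++ [i])
    else acc ++ [count' + i]

def algoritm (n : Int) : List Int :=
  if n = 1 then [1]
  else algoritmLoop (n - 1).toNat 1 n []

-- ===== PORT B =====
-- termination helper for the while loop: a product of two consecutive integers is nonnegative
theorem pvConsecNonneg (k : Int) : 0 ≤ (k + 1) * (k + 2) := by
  rcases le_or_gt k (-2) with h | h
  · nlinarith
  · nlinarith

-- the 'while (k+1)*(k+2) <= 2*n: k += 1' loop of B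
def findK (n k : Int) : Int :=
  if (k + 1) * (k + 2) ≤ 2 * n then findK n (k + 1) else k
termination_by (2 * n - k).toNat
decreasing_by
  have h0 : 0 ≤ (k + 1) * (k + 2) := pvConsecNonneg k
  have hk2n : k < 2 * n := by
    rcases le_or_gt 0 k with hk | hk
    · nlinarith
    · omega
  omega

def algoritm_alt (n : Int) : List Int :=
  if n < 1 then []
  else
    PySem.List.pyRange 1 (findK n 1) 1
      ++ [n - PySem.Int.floordiv (findK n 1 * (findK n 1 - 1)) 2]

-- ===== PRECONDITION & SPEC =====
def Spec_algoritm (n : Int) (out : List Int) : Prop := out = algoritm_alt n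
instance (n : Int) (out : List Int) : Decidable (Spec_algoritm n out) := by unfold Spec_algoritm; infer_instance

-- ===== CLAIM (what is proved, stated in full; the proofs are below) =====
def Claim_equal_algoritm : Prop := ∀ (n : Int), Dom_algoritm n → Spec_algoritm n (algoritm n)

-- ===== LEMMAS AND PROOFS =====

-- the while loop of B returns the largest k with k(k+1) ≤ 2n (given it starts inside the region)
theorem findK_spec (n : Int) : ∀ (m : Nat) (k : Int), (2 * n - k).toNat ≤ m → 1 ≤ k →
    k * (k + 1) ≤ 2 * n →
    1 ≤ findK n k ∧ (findK n k) * (findK n k + 1) ≤ 2 * n ∧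
      2 * n < (findK n k + 1) * (findK n k + 2) := by
  intro m
  induction m with
  | zero =>
    intro k hm hk h
    rw [findK]
    split_ifs with hcond
    · exfalso
      have : k < 2 * n := by nlinarith
      omega
    · exact ⟨hk, h, lt_of_not_ge hcond⟩
  | succ m ih =>
    intro k hm hk h
    rw [findK]
    split_ifs with hcond
    · have hk2n : k < 2 * n := by nlinarith
      exact ih (k + 1) (by omega) (by omega) (by linear_combination hcond)
    · exact ⟨hk, h, lt_of_not_ge hcond⟩

-- A's loop, run from index i with the invariant 2*count = 2n - (i-1)i, produces
-- the indices i..kk-1 followed by the absorbed remainder, where kk is B's break point.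
theorem loop_eq (n kk : Int) (hk1 : kk * (kk + 1) ≤ 2 * n) (hk2 : 2 * n < (kk + 1) * (kk + 2)) :
    ∀ (fuel : Nat) (i count : Int) (acc : List Int), 1 ≤ i → i ≤ kk →
      2 * count = 2 * n - (i - 1) * i → (kk - i).toNat < fuel →
      algoritmLoop fuel i count acc
        = acc ++ PySem.List.pyRange i kk 1 ++ [n - PySem.Int.floordiv (kk * (kk - 1)) 2] := by
  intro fuel
  induction fuel with
  | zero => intro i count acc _ _ _ hfuel; omega
  | succ fuel ih =>
    intro i count acc hi hik hcount hfuel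
    have hc' : 2 * (count - i) = 2 * n - i * (i + 1) := by linear_combination hcount
    rcases lt_or_eq_of_le hik with hlt | heq
    · -- i < kk : the branch 'count >= i+1' is taken, loop continues
      have hmono : (i + 1) * (i + 2) ≤ kk * (kk + 1) := by nlinarith
      have hge : count - i ≥ i + 1 := by nlinarith
      show algoritmLoop (fuel+1) i count acc = _
      rw [algoritmLoop]
      simp only [hge, if_pos]
      rw [ih (i + 1) (count - i) (acc ++ [i]) (by omega) (by omega)
        (by linear_combination hc') (by omega)]
      rw [PySem.List.pyRange_one_cons hlt]
      simp
    · -- i = kk : the break branch, append count + i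
      subst heq
      have hlt2 : ¬ (count - i ≥ i + 1) := by nlinarith
      show algoritmLoop (fuel+1) i count acc = _
      rw [algoritmLoop]
      simp only [hlt2, if_neg, not_false_iff]
      have hq : PySem.Int.floordiv (i * (i - 1)) 2 = n - count := by
        rw [PySem.Int.floordiv_eq_iff_of_pos (by norm_num)]
        refine ⟨by nlinarith, by nlinarith⟩
      rw [PySem.List.pyRange_one_eq_nil le_rfl, hq]
      have : count - i + i = n - (n - count) := by ring
      rw [this]
      simp

-- ===== VERDICT (by name: the statement is the Claim_ definition above) =====
theorem algoritm_spec : Claim_equal_algoritm := by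
  intro n _
  unfold Spec_algoritm algoritm algoritm_alt
  rcases lt_trichotomy n 1 with hn | hn | hn
  · -- n ≤ 0 : A's range(1, n) is empty, B returns [] at once
    rw [if_neg (by omega), if_pos hn]
    have h0 : (n - 1).toNat = 0 := by omega
    rw [h0]
    rfl
  · -- n = 1
    subst hn
    rw [if_pos rfl, if_neg (by norm_num)]
    rw [findK, if_neg (by norm_num)]
    rw [PySem.List.pyRange_one_eq_nil le_rfl]
    have h0 : PySem.Int.floordiv (1 * (1 - 1)) 2 = 0 := by
      rw [PySem.Int.floordiv_eq_iff_of_pos (by norm_num)]; norm_num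
    rw [h0]
    norm_num
  · -- n ≥ 2
    rw [if_neg (by omega), if_neg (by omega)]
    obtain ⟨hkk1, hk1, hk2⟩ := findK_spec n (2 * n - 1).toNat 1 le_rfl le_rfl (by omega)
    have hkn : findK n 1 < n := by nlinarith
    rw [loop_eq n (findK n 1) hk1 hk2 (n - 1).toNat 1 n [] le_rfl (by omega) (by ring)
      (by omega)]
    simp
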